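-- pv_equiv track=rewrite | github.com/reynolds-luke/PyGame-Dungeon-Crawler | helpers.py | generate_circular_room
-- ===== SOURCE A (Python) =====
-- from math import floor, ceil
--
-- def generate_circular_room(radius, wall_name, floor_name):
--     """
--     This function creates a circular room dictionary, given a radius
--     """
--     room = dict()
--
--     dim = [2 * radius, 2 * radius]
--     dim[0] += 2
--     dim[1] += 2
--     for row in range(-floor(dim[0] / 2), ceil(dim[0] / 2)):  # This iterates over the height, centering at zero
--         for col in range(-floor(dim[1] / 2), ceil(dim[1] / 2)):  # This iterates over the width, centering at zero
--             if row ** 2 + col ** 2 < radius ** 2:  # If fully within the radius, we add a floor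
--                 room[(row, col)] = floor_name
--             # If on the edge of being within the circle, we add a wall
--             elif (abs(row) - 1) ** 2 + col ** 2 < radius ** 2 or row ** 2 + (abs(col) - 1) ** 2 < radius ** 2:
--                 room[(row, col)] = wall_name
--     return room
-- ===== SOURCE B (Python) =====
-- from math import isqrt
--
-- def generate_circular_room(radius, wall_name, floor_name):
--     """Row-span construction: for each row compute the floor and wall column
--     spans in closed form with isqrt and emit them left-to-right, instead of
--     testing every cell of the grid against the circle inequalities."""
--     room = {}
--     if radius <= 0:
--         return room
--     r2 = radius * radius
--     for row in range(-radius, radius + 1):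
--         a1 = r2 - (abs(row) - 1) ** 2   # wall reach along this row: c*c < a1
--         a2 = r2 - row * row             # floor reach along this row: c*c < a2
--         if a2 > 0:
--             mf = isqrt(a2 - 1)                                  # floor span [-mf, mf]
--             m = max(isqrt(a1 - 1) if a1 > 0 else -1, mf + 1)    # full span [-m, m]
--             for c in range(-m, m + 1):
--                 room[(row, c)] = floor_name if -mf <= c <= mf else wall_name
--         elif a1 > 0:
--             mx = isqrt(a1 - 1)                                  # wall-only span
--             for c in range(-mx, mx + 1):
--                 room[(row, c)] = wall_name
--     return room
-- ===== Notes on version B (the rewrite author's own statement) =====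
-- stated objective: alternative
-- what changed: A tests every cell of a (2R+2)x(2R+2) grid against the circle inequalities; B computes, per row, the floor span and wall span in closed form with isqrt and emits only those contiguous column spans left-to-right, so no per-cell circle test is performed and empty regions are never visited.
import Mathlib
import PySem

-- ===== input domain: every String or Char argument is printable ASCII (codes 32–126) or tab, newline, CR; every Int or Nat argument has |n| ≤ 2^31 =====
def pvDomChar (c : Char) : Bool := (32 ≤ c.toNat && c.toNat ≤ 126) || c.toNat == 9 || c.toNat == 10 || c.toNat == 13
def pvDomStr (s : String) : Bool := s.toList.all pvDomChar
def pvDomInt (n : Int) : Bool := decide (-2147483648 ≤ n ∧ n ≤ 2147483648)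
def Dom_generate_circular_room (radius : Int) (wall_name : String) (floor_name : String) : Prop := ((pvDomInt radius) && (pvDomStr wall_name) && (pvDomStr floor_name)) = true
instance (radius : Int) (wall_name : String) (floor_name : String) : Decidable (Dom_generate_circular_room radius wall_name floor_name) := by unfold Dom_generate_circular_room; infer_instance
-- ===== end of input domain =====

-- B replaces A's per-cell circle tests by per-row closed-form floor/wall column
-- spans computed with isqrt (alternative algorithm, same output order and cost).


-- ===== PORT A =====
-- dim = [2*radius+2, 2*radius+2]; floor(dim/2) = ceil(dim/2) = radius+1 (the
-- float division of 2*radius+2 by 2 is exact for |radius| ≤ 2^31).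
def generate_circular_room (radius : Int) (wall_name : String) (floor_name : String) : List (Int × Int × String) :=
  let room : PySem.Dict (Int × Int) String :=
    (PySem.List.pyRange (-(radius + 1)) (radius + 1) 1).foldl (fun room row =>
      (PySem.List.pyRange (-(radius + 1)) (radius + 1) 1).foldl (fun room col =>
        if row ^ 2 + col ^ 2 < radius ^ 2 then
          room.insert (row, col) floor_name
        else if (|row| - 1) ^ 2 + col ^ 2 < radius ^ 2 ∨ row ^ 2 + (|col| - 1) ^ 2 < radius ^ 2 then
          room.insert (row, col) wall_name
        else room) room) PySem.Dict.empty
  room.items.map (fun p => (p.1.1, p.1.2, p.2))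

-- ===== PORT B =====
-- math.isqrt on a nonnegative int is Nat.sqrt (exact).
def generate_circular_room_alt (radius : Int) (wall_name : String) (floor_name : String) : List (Int × Int × String) :=
  let room : PySem.Dict (Int × Int) String := PySem.Dict.empty
  if radius ≤ 0 then room.items.map (fun p => (p.1.1, p.1.2, p.2))
  else
    let r2 := radius * radius
    let room := (PySem.List.pyRange (-radius) (radius + 1) 1).foldl (fun room row =>
      let a1 := r2 - (|row| - 1) ^ 2
      let a2 := r2 - row * row
      if 0 < a2 then
        let mf : Int := ((a2 - 1).toNat.sqrt : Nat)
        let M : Int := max (if 0 < a1 then (((a1 - 1).toNat.sqrt : Nat) : Int) else -1) (mf + 1)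
        (PySem.List.pyRange (-M) (M + 1) 1).foldl (fun room c =>
          room.insert (row, c) (if -mf ≤ c ∧ c ≤ mf then floor_name else wall_name)) room
      else if 0 < a1 then
        let mx : Int := ((a1 - 1).toNat.sqrt : Nat)
        (PySem.List.pyRange (-mx) (mx + 1) 1).foldl (fun room c =>
          room.insert (row, c) wall_name) room
      else room) room
    room.items.map (fun p => (p.1.1, p.1.2, p.2))

-- ===== PRECONDITION & SPEC =====
def Spec_generate_circular_room (radius : Int) (wall_name : String) (floor_name : String) (out : List (Int × Int × String)) : Prop := out = generate_circular_room_alt radius wall_name floor_name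
instance (radius : Int) (wall_name : String) (floor_name : String) (out : List (Int × Int × String)) : Decidable (Spec_generate_circular_room radius wall_name floor_name out) := by unfold Spec_generate_circular_room; infer_instance

-- ===== CLAIM (what is proved, stated in full; the proofs are below) =====
def Claim_equal_generate_circular_room : Prop := ∀ (radius : Int) (wall_name : String) (floor_name : String), Dom_generate_circular_room radius wall_name floor_name → Spec_generate_circular_room radius wall_name floor_name (generate_circular_room radius wall_name floor_name)

-- ===== LEMMAS AND PROOFS =====

-- the per-cell tile emitted by A's branch structure
def pvEmit (R : Int) (w f : String) (r c : Int) : Option String :=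
  if r ^ 2 + c ^ 2 < R ^ 2 then some f
  else if (|r| - 1) ^ 2 + c ^ 2 < R ^ 2 ∨ r ^ 2 + (|c| - 1) ^ 2 < R ^ 2 then some w
  else none

-- B's per-row column span and tile value
def pvColsB (R r : Int) : List Int :=
  if 0 < R * R - r * r then
    let mf : Int := ((R * R - r * r - 1).toNat.sqrt : Nat)
    let M : Int := max (if 0 < R * R - (|r| - 1) ^ 2 then (((R * R - (|r| - 1) ^ 2 - 1).toNat.sqrt : Nat) : Int) else -1) (mf + 1)
    PySem.List.pyRange (-M) (M + 1) 1
  else if 0 < R * R - (|r| - 1) ^ 2 then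
    let mx : Int := ((R * R - (|r| - 1) ^ 2 - 1).toNat.sqrt : Nat)
    PySem.List.pyRange (-mx) (mx + 1) 1
  else []

def pvValB (R : Int) (w f : String) (r c : Int) : String :=
  if 0 < R * R - r * r then
    (if -(((R * R - r * r - 1).toNat.sqrt : Nat) : Int) ≤ c ∧ c ≤ (((R * R - r * r - 1).toNat.sqrt : Nat) : Int) then f else w)
  else w

-- a fold of conditional inserts at fresh pairwise-distinct keys appends its emissions
theorem pv_items_foldl_emit {α κ ν : Type} [BEq κ] [LawfulBEq κ] (l : List α) (k : α → κ)
    (v? : α → Option ν) (d : PySem.Dict κ ν)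
    (hnd : (l.map k).Nodup) (hfresh : ∀ a ∈ l, d.contains (k a) = false) :
    (l.foldl (fun d a => (v? a).elim d (fun v => d.insert (k a) v)) d).items
      = d.items ++ l.filterMap (fun a => (v? a).map (fun v => (k a, v))) := by
  induction l generalizing d with
  | nil => simp
  | cons a t ih =>
    simp only [List.map_cons, List.nodup_cons] at hnd
    simp only [List.foldl_cons, List.filterMap_cons]
    cases hv : v? a with
    | none =>
      simp only [Option.elim_none, Option.map_none]
      exact ih _ hnd.2 (fun b hb => hfresh b (List.mem_cons_of_mem _ hb))
    | some v =>
      simp only [Option.elim_some, Option.map_some]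
      have hfa : d.contains (k a) = false := hfresh a List.mem_cons_self
      have hfresh' : ∀ b ∈ t, (d.insert (k a) v).contains (k b) = false := by
        intro b hb
        rw [PySem.Dict.contains_insert]
        have hne : k b ≠ k a := fun h => hnd.1 (h ▸ List.mem_map_of_mem hb)
        simp [hne, hfresh b (List.mem_cons_of_mem _ hb)]
      rw [ih _ hnd.2 hfresh', PySem.Dict.items_insert_of_not_contains _ _ hfa]
      simp

-- a row-by-row double loop over distinct rows with per-row distinct columns appends row blocks
theorem pv_items_double (rows : List Int) (cols : Int → List Int) (emit : Int → Int → Option String)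
    (hr : rows.Nodup) (hc : ∀ r, (cols r).Nodup) (d : PySem.Dict (Int × Int) String)
    (hfresh : ∀ p ∈ d.items, p.1.1 ∉ rows) :
    (rows.foldl (fun d r => (cols r).foldl (fun d c =>
        (emit r c).elim d (fun v => d.insert (r, c) v)) d) d).items
      = d.items ++ rows.flatMap (fun r => (cols r).filterMap (fun c => (emit r c).map (fun v => ((r, c), v)))) := by
  induction rows generalizing d with
  | nil => simp
  | cons r rt ih =>
    simp only [List.nodup_cons] at hr
    simp only [List.foldl_cons, List.flatMap_cons]
    have hinner : ((cols r).foldl (fun d c =>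
        (emit r c).elim d (fun v => d.insert (r, c) v)) d).items
        = d.items ++ (cols r).filterMap (fun c => (emit r c).map (fun v => ((r, c), v))) :=
      pv_items_foldl_emit (cols r) (fun c => (r, c)) (emit r) d
      ((hc r).map (fun c1 c2 h => by simpa using h))
      (fun c hc' => by
        rw [PySem.Dict.contains_eq_decide_mem_keys]
        simp only [PySem.Dict.keys, decide_eq_false_iff_not]
        intro hmem
        rcases List.mem_map.mp hmem with ⟨p, hp, hp1⟩
        exact hfresh p hp (hp1 ▸ List.mem_cons_self))
    have hfresh' : ∀ p ∈ ((cols r).foldl (fun d c =>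
        (emit r c).elim d (fun v => d.insert (r, c) v)) d).items,
        p.1.1 ∉ rt := by
      intro p hp
      rw [hinner] at hp
      rcases List.mem_append.mp hp with hp | hp
      · exact fun h => hfresh p hp (List.mem_cons_of_mem _ h)
      · rcases List.mem_filterMap.mp hp with ⟨c, _, hc2⟩
        cases he : emit r c with
        | none => rw [he] at hc2; simp at hc2
        | some v =>
          rw [he] at hc2
          simp only [Option.map_some, Option.some.injEq] at hc2
          subst hc2
          exact hr.1
    rw [ih hr.2 _ hfresh', hinner, List.append_assoc]

-- c² < a  ⟺  |c| ≤ isqrt(a−1)   (for 0 < a)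
theorem pv_sq_lt_iff (a c : Int) (ha : 0 < a) :
    c * c < a ↔ |c| ≤ (((a - 1).toNat.sqrt : Nat) : Int) := by
  have hn : ((a - 1).toNat : Int) = a - 1 := Int.toNat_of_nonneg (by omega)
  rw [← Int.natAbs_mul_self, Int.abs_eq_natAbs]
  constructor
  · intro h
    have h1 : c.natAbs * c.natAbs ≤ (a - 1).toNat := by omega
    exact_mod_cast Nat.le_sqrt.mpr h1
  · intro h
    have h2 : c.natAbs ≤ (a - 1).toNat.sqrt := by exact_mod_cast h
    have h3 := Nat.le_sqrt.mp h2
    omega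

-- isqrt(a−1) < R whenever 0 < a ≤ R²
theorem pv_sqrt_lt (a R : Int) (ha : 0 < a) (hR : a ≤ R * R) (hR0 : 0 ≤ R) :
    (((a - 1).toNat.sqrt : Nat) : Int) < R := by
  have hs := Nat.sqrt_le (a - 1).toNat
  have hn : ((a - 1).toNat : Int) = a - 1 := Int.toNat_of_nonneg (by omega)
  set s : Nat := (a - 1).toNat.sqrt with hsd
  have h1 : ((s * s : Nat) : Int) ≤ a - 1 := by omega
  push_cast at h1
  nlinarith [Int.natCast_nonneg s]

-- arithmetic core: A's per-cell emission on a floor-bearing row is B's span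
theorem pv_emit_floor_row (R : Int) (w f : String) (r : Int) (h2 : r * r < R * R) (c : Int) :
    pvEmit R w f r c
      = (if c ∈ pvColsB R r then some (pvValB R w f r c) else none) := by
  have ha2 : (0 : Int) < R * R - r * r := by omega
  simp only [pvEmit, pvColsB, pvValB, if_pos ha2]
  set mf : Int := (((R * R - r * r - 1).toNat.sqrt : Nat) : Int) with hmfd
  set s1 : Int := (if 0 < R * R - (|r| - 1) ^ 2 then (((R * R - (|r| - 1) ^ 2 - 1).toNat.sqrt : Nat) : Int) else -1) with hs1d
  have hmf0 : 0 ≤ mf := Int.natCast_nonneg _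
  have hfl : (r ^ 2 + c ^ 2 < R ^ 2) ↔ |c| ≤ mf := by
    have h := pv_sq_lt_iff (R * R - r * r) c ha2
    rw [hmfd]
    constructor
    · intro hh; exact h.mp (by nlinarith)
    · intro hh; have := h.mpr hh; nlinarith
  have hx : ((|r| - 1) ^ 2 + c ^ 2 < R ^ 2) ↔ |c| ≤ s1 := by
    rw [hs1d]
    by_cases h1 : 0 < R * R - (|r| - 1) ^ 2
    · rw [if_pos h1]
      have h := pv_sq_lt_iff (R * R - (|r| - 1) ^ 2) c h1
      constructor
      · intro hh; exact h.mp (by nlinarith)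
      · intro hh; have := h.mpr hh; nlinarith
    · rw [if_neg h1]
      constructor
      · intro hh; exfalso; nlinarith [mul_self_nonneg c]
      · intro hh; exfalso; have := abs_nonneg c; omega
  have hM1 : mf + 1 ≤ max s1 (mf + 1) := le_max_right _ _
  have hMs : s1 ≤ max s1 (mf + 1) := le_max_left _ _
  simp only [PySem.List.mem_pyRange_one]
  by_cases hcf : |c| ≤ mf
  · have hmem : -(max s1 (mf + 1)) ≤ c ∧ c < max s1 (mf + 1) + 1 := by
      rcases abs_le.mp hcf with ⟨hl, hr⟩; omega
    rw [if_pos (hfl.mpr hcf), if_pos hmem, if_pos (abs_le.mp hcf)]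
  · have hnf : ¬ (r ^ 2 + c ^ 2 < R ^ 2) := fun hh => hcf (hfl.mp hh)
    have hc1 : 1 ≤ |c| := by omega
    have hy : (r ^ 2 + (|c| - 1) ^ 2 < R ^ 2) ↔ |c| ≤ mf + 1 := by
      have h := pv_sq_lt_iff (R * R - r * r) (|c| - 1) ha2
      have hab : |(|c| - 1)| = |c| - 1 := abs_of_nonneg (by omega)
      rw [hab] at h
      rw [hmfd]
      constructor
      · intro hh; have := h.mp (by nlinarith); omega
      · intro hh; have := h.mpr (by omega); nlinarith
    rw [if_neg hnf]
    by_cases hcM : |c| ≤ max s1 (mf + 1)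
    · have hwall : (|r| - 1) ^ 2 + c ^ 2 < R ^ 2 ∨ r ^ 2 + (|c| - 1) ^ 2 < R ^ 2 := by
        rcases le_max_iff.mp hcM with h | h
        · exact Or.inl (hx.mpr h)
        · exact Or.inr (hy.mpr h)
      have hmem : -(max s1 (mf + 1)) ≤ c ∧ c < max s1 (mf + 1) + 1 := by
        rcases abs_le.mp hcM with ⟨hl, hr⟩; omega
      rw [if_pos hwall, if_pos hmem, if_neg (fun hh => hcf (abs_le.mpr hh))]
    · have hnw : ¬ ((|r| - 1) ^ 2 + c ^ 2 < R ^ 2 ∨ r ^ 2 + (|c| - 1) ^ 2 < R ^ 2) := by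
        rintro (h | h)
        · exact hcM (le_trans (hx.mp h) hMs)
        · exact hcM (le_trans (hy.mp h) hM1)
      have hnm : ¬ (-(max s1 (mf + 1)) ≤ c ∧ c < max s1 (mf + 1) + 1) := by
        intro hh
        exact hcM (abs_le.mpr ⟨by omega, by omega⟩)
      rw [if_neg hnw, if_neg hnm]

-- arithmetic core: A's per-cell emission on a non-floor row is B's span
theorem pv_emit_rim_row (R : Int) (w f : String) (r : Int) (h2 : ¬ r * r < R * R) (c : Int) :
    pvEmit R w f r c
      = (if c ∈ pvColsB R r then some (pvValB R w f r c) else none) := by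
  have ha2 : ¬ (0 : Int) < R * R - r * r := by omega
  simp only [pvEmit, pvColsB, pvValB, if_neg ha2]
  have hnf : ¬ (r ^ 2 + c ^ 2 < R ^ 2) := by nlinarith [mul_self_nonneg c]
  have hny : ¬ (r ^ 2 + (|c| - 1) ^ 2 < R ^ 2) := by nlinarith [mul_self_nonneg (|c| - 1)]
  rw [if_neg hnf]
  by_cases h1 : 0 < R * R - (|r| - 1) ^ 2
  · rw [if_pos h1]
    simp only [PySem.List.mem_pyRange_one]
    set mx : Int := (((R * R - (|r| - 1) ^ 2 - 1).toNat.sqrt : Nat) : Int) with hmxd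
    have hx : ((|r| - 1) ^ 2 + c ^ 2 < R ^ 2) ↔ |c| ≤ mx := by
      have h := pv_sq_lt_iff (R * R - (|r| - 1) ^ 2) c h1
      rw [hmxd]
      constructor
      · intro hh; exact h.mp (by nlinarith)
      · intro hh; have := h.mpr hh; nlinarith
    by_cases hcx : |c| ≤ mx
    · have hmem : -mx ≤ c ∧ c < mx + 1 := by rcases abs_le.mp hcx with ⟨hl, hr⟩; omega
      rw [if_pos (Or.inl (hx.mpr hcx)), if_pos hmem]
    · have hnm : ¬ (-mx ≤ c ∧ c < mx + 1) := fun hh => hcx (abs_le.mpr ⟨by omega, by omega⟩)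
      rw [if_neg (by rintro (h | h); exacts [hcx (hx.mp h), hny h]), if_neg hnm]
  · rw [if_neg h1]
    have hnx : ¬ ((|r| - 1) ^ 2 + c ^ 2 < R ^ 2) := by nlinarith [mul_self_nonneg c]
    rw [if_neg (by rintro (h | h); exacts [hnx h, hny h])]
    simp

-- B's span is empty or a symmetric range of half-width at most R
theorem pv_colsB_shape (R r : Int) (hR : 0 ≤ R) :
    pvColsB R r = [] ∨ ∃ m, 0 ≤ m ∧ m ≤ R ∧ pvColsB R r = PySem.List.pyRange (-m) (m + 1) 1 := by
  unfold pvColsB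
  by_cases h2 : 0 < R * R - r * r
  · rw [if_pos h2]
    refine Or.inr ⟨_, le_max_of_le_right (by positivity), ?_, rfl⟩
    have hmf : (((R * R - r * r - 1).toNat.sqrt : Nat) : Int) < R :=
      pv_sqrt_lt _ R h2 (by nlinarith [mul_self_nonneg r]) hR
    have hs1 : (if 0 < R * R - (|r| - 1) ^ 2 then (((R * R - (|r| - 1) ^ 2 - 1).toNat.sqrt : Nat) : Int) else -1) ≤ R := by
      by_cases h1 : 0 < R * R - (|r| - 1) ^ 2
      · rw [if_pos h1]
        exact le_of_lt (pv_sqrt_lt _ R h1 (by nlinarith [sq_nonneg (|r| - 1)]) hR)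
      · rw [if_neg h1]; omega
    exact max_le hs1 (by omega)
  · rw [if_neg h2]
    by_cases h1 : 0 < R * R - (|r| - 1) ^ 2
    · rw [if_pos h1]
      exact Or.inr ⟨_, by positivity,
        le_of_lt (pv_sqrt_lt _ R h1 (by nlinarith [sq_nonneg (|r| - 1)]) hR), rfl⟩
    · rw [if_neg h1]; exact Or.inl rfl

theorem pv_colsB_nodup (R r : Int) : (pvColsB R r).Nodup := by
  unfold pvColsB
  split_ifs <;> first | exact PySem.List.nodup_pyRange_one _ _ | exact List.nodup_nil

-- a filterMap over a wide range that is `some` exactly on a sub-range is a map over the sub-range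
theorem pv_filterMap_window {β : Type} (a b lo hi : Int) (g : Int → Option β) (h' : Int → β)
    (ha : a ≤ lo) (hb : hi ≤ b) (hlo : lo ≤ hi)
    (hg : ∀ c, g c = if c ∈ PySem.List.pyRange lo hi 1 then some (h' c) else none) :
    (PySem.List.pyRange a b 1).filterMap g = (PySem.List.pyRange lo hi 1).map h' := by
  rw [PySem.List.pyRange_one_append a lo b ha (by omega),
      PySem.List.pyRange_one_append lo hi b hlo hb, List.filterMap_append, List.filterMap_append]
  have hleft : (PySem.List.pyRange a lo 1).filterMap g = [] :=
    List.filterMap_eq_nil_iff.mpr (fun c hc => by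
      rw [hg c, if_neg]
      intro hm
      rw [PySem.List.mem_pyRange_one] at hc hm
      omega)
  have hright : (PySem.List.pyRange hi b 1).filterMap g = [] :=
    List.filterMap_eq_nil_iff.mpr (fun c hc => by
      rw [hg c, if_neg]
      intro hm
      rw [PySem.List.mem_pyRange_one] at hc hm
      omega)
  have hmid : (PySem.List.pyRange lo hi 1).filterMap g = (PySem.List.pyRange lo hi 1).map h' := by
    rw [List.filterMap_congr (g := fun c => some (h' c)) (fun c hc => by rw [hg c, if_pos hc])]
    exact List.filterMap_eq_map_iff_forall_eq_some.mpr fun x => congrFun rfl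
  rw [hleft, hright, hmid, List.nil_append, List.append_nil]

-- per-row equality of the emitted blocks
theorem pv_row_eq (R : Int) (hR : 0 ≤ R) (w f : String) (r : Int) :
    (PySem.List.pyRange (-(R + 1)) (R + 1) 1).filterMap
        (fun c => (pvEmit R w f r c).map (fun v => ((r, c), v)))
      = (pvColsB R r).map (fun c => ((r, c), pvValB R w f r c)) := by
  have hcell : ∀ c, pvEmit R w f r c = (if c ∈ pvColsB R r then some (pvValB R w f r c) else none) := by
    intro c
    by_cases h2 : r * r < R * R
    · exact pv_emit_floor_row R w f r h2 c
    · exact pv_emit_rim_row R w f r h2 c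
  rcases pv_colsB_shape R r hR with hnil | ⟨m, hm0, hmR, hcols⟩
  · rw [hnil, List.map_nil]
    refine List.filterMap_eq_nil_iff.mpr (fun c _ => ?_)
    rw [hcell c, hnil]
    simp
  · rw [hcols]
    refine pv_filterMap_window _ _ _ _ _ _ (by omega) (by omega) (by omega) (fun c => ?_)
    rw [hcell c, hcols]
    split_ifs <;> simp

-- A's branch structure is the per-cell emission
theorem pv_stepA_eq (R : Int) (w f : String) :
    (fun (d : PySem.Dict (Int × Int) String) row =>
      (PySem.List.pyRange (-(R + 1)) (R + 1) 1).foldl (fun d col =>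
        if row ^ 2 + col ^ 2 < R ^ 2 then d.insert (row, col) f
        else if (|row| - 1) ^ 2 + col ^ 2 < R ^ 2 ∨ row ^ 2 + (|col| - 1) ^ 2 < R ^ 2 then d.insert (row, col) w
        else d) d)
    = fun d row => (PySem.List.pyRange (-(R + 1)) (R + 1) 1).foldl (fun d c =>
        (pvEmit R w f row c).elim d (fun v => d.insert (row, c) v)) d := by
  funext d row
  congr 1
  funext d c
  unfold pvEmit
  split_ifs <;> rfl

-- B's span loops are the generic emission over pvColsB/pvValB
theorem pv_stepB_eq (R : Int) (w f : String) :
    (fun (d : PySem.Dict (Int × Int) String) row =>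
      let a1 := R * R - (|row| - 1) ^ 2
      let a2 := R * R - row * row
      if 0 < a2 then
        let mf : Int := ((a2 - 1).toNat.sqrt : Nat)
        let M : Int := max (if 0 < a1 then (((a1 - 1).toNat.sqrt : Nat) : Int) else -1) (mf + 1)
        (PySem.List.pyRange (-M) (M + 1) 1).foldl (fun d c =>
          d.insert (row, c) (if -mf ≤ c ∧ c ≤ mf then f else w)) d
      else if 0 < a1 then
        let mx : Int := ((a1 - 1).toNat.sqrt : Nat)
        (PySem.List.pyRange (-mx) (mx + 1) 1).foldl (fun d c => d.insert (row, c) w) d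
      else d)
    = fun d row => (pvColsB R row).foldl (fun d c =>
        (some (pvValB R w f row c)).elim d (fun v => d.insert (row, c) v)) d := by
  funext d row
  by_cases h2 : 0 < R * R - row * row <;>
    by_cases h1 : 0 < R * R - (|row| - 1) ^ 2 <;>
      simp only [pvColsB, pvValB, h2, h1, ite_true, ite_false, Option.elim_some, List.foldl_nil]

-- B's flatMap block is a map block
theorem pv_rowB_map (R : Int) (w f : String) (r : Int) :
    (pvColsB R r).filterMap (fun c => (some (pvValB R w f r c)).map (fun v => ((r, c), v)))
      = (pvColsB R r).map (fun c => ((r, c), pvValB R w f r c)) := by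
  simp

-- the dead corner rows of A's grid have an empty span
theorem pv_colsB_corner (R : Int) (hR : 0 ≤ R) : pvColsB R (-(R + 1)) = [] := by
  have habs : |(-(R + 1))| = R + 1 := by rw [abs_neg, abs_of_nonneg (by omega)]
  unfold pvColsB
  rw [if_neg (by nlinarith), if_neg (by rw [habs]; nlinarith)]

theorem generate_circular_room_spec : Claim_equal_generate_circular_room := by
  intro radius w f _
  unfold Spec_generate_circular_room
  by_cases hneg : radius < 0
  · simp only [generate_circular_room, generate_circular_room_alt]
    rw [PySem.List.pyRange_one_eq_nil (show radius + 1 ≤ -(radius + 1) by omega),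
        if_pos (le_of_lt hneg)]
    rfl
  · have hR : 0 ≤ radius := by omega
    simp only [generate_circular_room, generate_circular_room_alt]
    rw [pv_stepA_eq radius w f,
        pv_items_double _ (fun _ => PySem.List.pyRange (-(radius + 1)) (radius + 1) 1)
          (pvEmit radius w f) (PySem.List.nodup_pyRange_one _ _)
          (fun _ => PySem.List.nodup_pyRange_one _ _) PySem.Dict.empty
          (fun p hp => by simp [PySem.Dict.empty] at hp)]
    by_cases h0 : radius ≤ 0
    · have h00 : radius = 0 := le_antisymm h0 hR
      subst h00
      rw [if_pos le_rfl]
      have hnil : (PySem.List.pyRange (-(0 + 1) : Int) (0 + 1) 1).flatMap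
          (fun r => (PySem.List.pyRange (-(0 + 1) : Int) (0 + 1) 1).filterMap
            (fun c => (pvEmit 0 w f r c).map (fun v => ((r, c), v)))) = [] := by
        refine List.flatMap_eq_nil_iff.mpr (fun r _ => ?_)
        rw [pv_row_eq 0 le_rfl w f r]
        have hc : pvColsB 0 r = [] := by
          unfold pvColsB
          rw [if_neg (by nlinarith [mul_self_nonneg r]),
              if_neg (by nlinarith [sq_nonneg (|r| - 1)])]
        rw [hc, List.map_nil]
      rw [hnil]
      rfl
    · rw [if_neg h0]
      rw [pv_stepB_eq radius w f,
          pv_items_double _ (pvColsB radius) (fun r c => some (pvValB radius w f r c))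
            (PySem.List.nodup_pyRange_one _ _) (pv_colsB_nodup radius) PySem.Dict.empty
            (fun p hp => by simp [PySem.Dict.empty] at hp)]
      have hrows : PySem.List.pyRange (-(radius + 1)) (radius + 1) 1
          = -(radius + 1) :: PySem.List.pyRange (-radius) (radius + 1) 1 := by
        rw [PySem.List.pyRange_one_cons (by omega), show -(radius + 1) + 1 = -radius by ring]
      have hbody : (fun r => (PySem.List.pyRange (-(radius + 1)) (radius + 1) 1).filterMap
            (fun c => (pvEmit radius w f r c).map (fun v => ((r, c), v))))
          = fun r => (pvColsB radius r).filterMap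
            (fun c => (some (pvValB radius w f r c)).map (fun v => ((r, c), v))) := by
        funext r
        rw [pv_row_eq radius hR w f r, pv_rowB_map]
      rw [hbody, hrows, List.flatMap_cons, pv_colsB_corner radius hR,
          List.filterMap_nil, List.nil_append]
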